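-- pv_equiv track=rewrite | github.com/jiwnchoi/acmicpc-jason-choi | 13335/truck.py | solution
-- ===== SOURCE A (Python) =====
-- def solution(bridge_length, weight, truck_weights):
--     time = 0
--     end = list()
--     going = list()
--     waiting = list()
--     going_weight = 0
--     tmp = 0
--     for truck in truck_weights:
--         waiting.append([truck,1])
--
--     while waiting != [] or going != []:
--         time += 1
--
--
--         i=0
--         while i < len(going):
--             going[i][1] += 1
--             if going[i][1] > bridge_length:
--                 going_weight -= going[i][0]
--                 del(going[i])
--                 i -= 1
--             i+=1
--
--
--         if waiting and (going_weight + waiting[0][0]) <= weight: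
--             truck = waiting.pop(0)
--             going.append(truck)
--             going_weight += truck[0]
--
--
--     answer = time
--     return answer
-- ===== SOURCE B (Python) =====
-- def solution(bridge_length, weight, truck_weights):
--     # Event-driven: jump time per truck using a FIFO queue of (exit_time, weight)
--     # pairs instead of simulating every time unit.
--     span = bridge_length if bridge_length > 1 else 1
--     bridge = []          # (exit_time, weight) in entry order; exit times strictly increase
--     head = 0             # front index of the queue (amortized O(1) pops)
--     load = 0
--     t = 0
--     ans = 0
--     for w in truck_weights:
--         t += 1
--         # trucks whose exit time has passed have left the bridge
--         while head < len(bridge) and bridge[head][0] <= t: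
--             load -= bridge[head][1]
--             head += 1
--         # jump ahead to successive exit times until this truck fits
--         while head < len(bridge) and load + w > weight:
--             e, u = bridge[head]
--             head += 1
--             load -= u
--             t = e
--         bridge.append((t + span, w))
--         load += w
--         ans = t + span
--     return ans
-- ===== Notes on version B (the rewrite author's own statement) =====
-- stated objective: alternative
-- what changed: B replaces A's tick-by-tick simulation (one loop iteration per time unit, rescanning the bridge each tick) by an event-driven pass: one iteration per truck, jumping time directly to the next exit events taken from a FIFO queue of (exit_time, weight) pairs.
-- outside the precondition, e.g. on solution(2, 3, [-10, 10]): A returns 4, B returns 4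
import Mathlib
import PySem

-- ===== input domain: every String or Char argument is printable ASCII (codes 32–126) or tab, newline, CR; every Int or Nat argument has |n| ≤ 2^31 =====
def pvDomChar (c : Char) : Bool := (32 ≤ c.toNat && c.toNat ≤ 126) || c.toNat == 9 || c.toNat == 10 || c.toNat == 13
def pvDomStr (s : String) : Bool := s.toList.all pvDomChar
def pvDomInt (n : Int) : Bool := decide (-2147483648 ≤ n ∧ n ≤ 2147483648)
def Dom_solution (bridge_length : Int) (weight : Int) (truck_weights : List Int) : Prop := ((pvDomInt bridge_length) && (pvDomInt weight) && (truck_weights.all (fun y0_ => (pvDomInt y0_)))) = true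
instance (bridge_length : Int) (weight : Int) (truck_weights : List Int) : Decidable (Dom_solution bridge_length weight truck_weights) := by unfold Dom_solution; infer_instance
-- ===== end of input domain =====

-- B replaces A's tick-by-tick bridge simulation by an event-driven pass over a FIFO queue of exit
-- times: one loop iteration per truck instead of one per simulated time unit (an alternative algorithm).


-- ===== PORT A =====
-- the inner `while i < len(going)` loop: advance every truck one position, delete those past the
-- bridge, accumulating the total deleted weight (exact transcription of the index/del dance)
def pvAdvanceA (bridge_length : Int) : List (Int × Int) → List (Int × Int) × Int
  | [] => ([], 0)
  | (w, p) :: rest =>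
    let (g, r) := pvAdvanceA bridge_length rest
    if p + 1 > bridge_length then (g, r + w) else ((w, p + 1) :: g, r)

-- the outer `while waiting != [] or going != []` loop; `fuel` only makes the (possibly
-- non-terminating) Python loop total, Pre_solution guarantees it suffices
def pvLoopA (bridge_length weight : Int) :
    Nat → Int → List (Int × Int) → List (Int × Int) → Int → Int
  | 0, time, _, _, _ => time
  | fuel + 1, time, going, waiting, gw =>
    if waiting = [] ∧ going = [] then time
    else
      let t := time + 1
      let ar := pvAdvanceA bridge_length going
      let gw' := gw - ar.2
      match waiting with
      | [] => pvLoopA bridge_length weight fuel t ar.1 [] gw'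
      | tr :: ws =>
        if gw' + tr.1 ≤ weight then
          pvLoopA bridge_length weight fuel t (ar.1 ++ [tr]) ws (gw' + tr.1)
        else
          pvLoopA bridge_length weight fuel t ar.1 (tr :: ws) gw'

def solution (bridge_length : Int) (weight : Int) (truck_weights : List Int) : Int :=
  pvLoopA bridge_length weight
    (truck_weights.length * (if bridge_length > 1 then bridge_length else 1).toNat + 1)
    0 [] (truck_weights.map (fun truck => (truck, 1))) 0

-- ===== PORT B =====
-- `while head < len(bridge) and bridge[head][0] <= t`: pop trucks whose exit time has passed
def pvDropB (t : Int) : List (Int × Int) → Int → List (Int × Int) × Int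
  | [], load => ([], load)
  | (e, u) :: bs, load => if e ≤ t then pvDropB t bs (load - u) else ((e, u) :: bs, load)

-- `while head < len(bridge) and load + w > weight`: jump to successive exit times until w fits
def pvJumpB (weight w : Int) : List (Int × Int) → Int → Int → List (Int × Int) × Int × Int
  | bs, load, t =>
    if load + w > weight then
      match bs with
      | [] => ([], load, t)
      | (e, u) :: bs' => pvJumpB weight w bs' (load - u) e
    else (bs, load, t)

-- the `for w in truck_weights` loop of B
def pvLoopB (span weight : Int) :
    List Int → List (Int × Int) → Int → Int → Int → Int
  | [], _, _, _, ans => ans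
  | w :: ws, bridge, load, t, _ =>
    let dl := pvDropB (t + 1) bridge load
    let jl := pvJumpB weight w dl.1 dl.2 (t + 1)
    pvLoopB span weight ws (jl.1 ++ [(jl.2.2 + span, w)]) (jl.2.1 + w) jl.2.2 (jl.2.2 + span)

def solution_alt (bridge_length : Int) (weight : Int) (truck_weights : List Int) : Int :=
  pvLoopB (if bridge_length > 1 then bridge_length else 1) weight truck_weights [] 0 0 0

-- ===== PRECONDITION & SPEC =====
-- Pre_ requires every truck weight ≤ weight: a heavier truck waiting before an empty bridge makes
-- A's while loop run forever. (This also excludes some inputs where negative weights let A finish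
-- anyway; B returns the same value there — see the cite in the claim.)
def Pre_solution (bridge_length : Int) (weight : Int) (truck_weights : List Int) : Prop :=
  ∀ w ∈ truck_weights, w ≤ weight

instance (bridge_length : Int) (weight : Int) (truck_weights : List Int) : Decidable (Pre_solution bridge_length weight truck_weights) := by unfold Pre_solution; infer_instance

def pvWitness_solution : Int × Int × List Int := (2, 10, [7, 4, 5, 6])

def Spec_solution (bridge_length : Int) (weight : Int) (truck_weights : List Int) (out : Int) : Prop := out = solution_alt bridge_length weight truck_weights
instance (bridge_length : Int) (weight : Int) (truck_weights : List Int) (out : Int) : Decidable (Spec_solution bridge_length weight truck_weights out) := by unfold Spec_solution; infer_instance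

-- ===== CLAIM (what is proved, stated in full; the proofs are below) =====
def Claim_equal_solution : Prop := ∀ (bridge_length : Int) (weight : Int) (truck_weights : List Int), Dom_solution bridge_length weight truck_weights → Pre_solution bridge_length weight truck_weights → Spec_solution bridge_length weight truck_weights (solution bridge_length weight truck_weights)

-- ===== LEMMAS AND PROOFS =====

-- abstract view: a truck on the bridge is its (exit_time, weight) pair; at current time t the
-- concrete A-state stores it as (weight, position) with position = t + span + 1 - exit_time
def pvConc (span t : Int) (bridge : List (Int × Int)) : List (Int × Int) :=
  bridge.map (fun p => (p.2, t + span + 1 - p.1))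

theorem pvLoopA_nil (L W : Int) (f : Nat) (t gw : Int) :
    pvLoopA L W f t [] [] gw = t := by
  cases f <;> simp [pvLoopA]

-- one advance of the concrete list = filtering out the exits that are ≤ t+1
theorem pvAdvanceA_conc (L span t : Int) (hspan : span = if L > 1 then L else 1)
    (bridge : List (Int × Int)) (hb : ∀ p ∈ bridge, t < p.1 ∧ p.1 ≤ t + span) :
    pvAdvanceA L (pvConc span t bridge) =
      (pvConc span (t + 1) (bridge.filter (fun p => t + 1 < p.1)),
       ((bridge.filter (fun p => ¬ t + 1 < p.1)).map (·.2)).sum) := by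
  induction bridge with
  | nil => simp [pvConc, pvAdvanceA]
  | cons p rest ih =>
    obtain ⟨x, v⟩ := p
    have hp := hb (x, v) (by simp)
    have ih' := ih (fun q hq => hb q (List.mem_cons_of_mem _ hq))
    by_cases hc : t + 1 < x
    · have hcond : ¬ (t + span + 1 - x + 1 > L) := by
        by_cases hL : L > 1 <;> simp [hL] at hspan <;> omega
      have harith : t + span + 1 - x + 1 = t + 1 + span + 1 - x := by ring
      simp only [pvConc, List.map_cons, pvAdvanceA, List.filter_cons] at ih' ⊢
      rw [ih']
      simp [hc, hcond, harith, pvConc]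
      omega
    · have hcond : t + span + 1 - x + 1 > L := by
        by_cases hL : L > 1 <;> simp [hL] at hspan <;> omega
      simp only [pvConc, List.map_cons, pvAdvanceA, List.filter_cons] at ih' ⊢
      rw [ih']
      simp [hc, hcond, pvConc]
      ring

-- pvDropB computes the same filters, given strictly increasing exit times
theorem pvDropB_char (u : Int) (bridge : List (Int × Int)) (load : Int)
    (hs : bridge.Pairwise (fun a b => a.1 < b.1)) :
    pvDropB u bridge load =
      (bridge.filter (fun p => u < p.1),
       load - ((bridge.filter (fun p => ¬ u < p.1)).map (·.2)).sum) := by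
  induction bridge generalizing load with
  | nil => simp [pvDropB]
  | cons p rest ih =>
    obtain ⟨e, v⟩ := p
    rw [List.pairwise_cons] at hs
    by_cases hc : e ≤ u
    · have := ih (load := load - v) hs.2
      simp only [pvDropB, List.filter_cons]
      have hne : ¬ u < e := by omega
      simp [hc, hne, this]
      omega
    · have h1 : List.filter (fun p => decide (u < p.1)) rest = rest :=
        List.filter_eq_self.mpr (fun q hq => by
          have := hs.1 q hq; simp; omega)
      have h2 : List.filter (fun p => !decide (u < p.1)) rest = [] :=
        List.filter_eq_nil_iff.mpr (fun q hq => by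
          have := hs.1 q hq; simp; omega)
      have hlt : u < e := by omega
      have h3 : List.filter (fun p : Int × Int => decide (p.1 ≤ u)) rest = [] :=
        List.filter_eq_nil_iff.mpr (fun q hq => by
          have := hs.1 q hq; simp; omega)
      simp [pvDropB, List.filter_cons, hc, hlt, h1, h3]

-- pvDropB removes nothing when every exit time is still in the future
theorem pvDropB_none (u : Int) (bs : List (Int × Int)) (load : Int)
    (h : ∀ p ∈ bs, u < p.1) : pvDropB u bs load = (bs, load) := by
  cases bs with
  | nil => simp [pvDropB]
  | cons p rest =>
    obtain ⟨e, v⟩ := p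
    have := h (e, v) (by simp)
    simp [pvDropB, not_le.mpr this]

-- jumping from t+1 after one fruitless tick equals jumping from t+2 after dropping expired exits
theorem pvJumpB_stable (W w t : Int) (b1 : List (Int × Int)) (l1 : Int)
    (hw : w ≤ W) (hl : l1 = (b1.map (·.2)).sum) (hinf : ¬ l1 + w ≤ W)
    (hs : b1.Pairwise (fun a b => a.1 < b.1)) (hgt : ∀ p ∈ b1, t + 1 < p.1) :
    pvJumpB W w b1 l1 (t + 1) =
      pvJumpB W w (pvDropB (t + 2) b1 l1).1 (pvDropB (t + 2) b1 l1).2 (t + 2) := by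
  cases b1 with
  | nil => simp at hl; omega
  | cons p bs' =>
    obtain ⟨e, v⟩ := p
    have he : t + 1 < e := (hgt (e, v) (by simp))
    rw [List.pairwise_cons] at hs
    have hrest : ∀ q ∈ bs', e < q.1 := fun q hq => hs.1 q hq
    rw [show pvJumpB W w ((e, v) :: bs') l1 (t + 1) = pvJumpB W w bs' (l1 - v) e by
      simp [pvJumpB, hinf]]
    by_cases hc : e ≤ t + 2
    · have hdrop : pvDropB (t + 2) ((e, v) :: bs') l1 = (bs', l1 - v) := by
        simp [pvDropB, hc, pvDropB_none (t + 2) bs' (l1 - v)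
          (fun q hq => by have := hrest q hq; omega)]
      rw [hdrop]
      have : e = t + 2 := by omega
      rw [this]
    · have hdrop : pvDropB (t + 2) ((e, v) :: bs') l1 = ((e, v) :: bs', l1) := by
        simp [pvDropB, hc]
      rw [hdrop]
      simp [pvJumpB, hinf]

-- the bridge load splits along any filter of the bridge
theorem pvSumSplit (u : Int) (l : List (Int × Int)) :
    ((l.filter (fun q => u < q.1)).map (·.2)).sum
      + ((l.filter (fun q => ¬ u < q.1)).map (·.2)).sum = (l.map (·.2)).sum := by
  induction l with
  | nil => simp
  | cons a l ih =>
    by_cases h : u < a.1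
    · simp [List.filter_cons, h, not_lt] at ih ⊢; linarith
    · have h' : a.1 ≤ u := by omega
      simp [List.filter_cons, h, h', not_lt] at ih ⊢; linarith

-- pvJumpB pops nothing when the truck already fits
theorem pvJumpB_noop (W w : Int) (bs : List (Int × Int)) (load t : Int)
    (h : ¬ load + w > W) : pvJumpB W w bs load t = (bs, load, t) := by
  cases bs <;> simp [pvJumpB, h]

-- main simulation lemma: A's tick loop equals B's per-truck loop on corresponding states
theorem pvMain (L W span : Int) (hspan : span = if L > 1 then L else 1) :
    ∀ (fuel : Nat) (waiting : List Int) (bridge : List (Int × Int)) (t load ans : Int),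
      bridge.Pairwise (fun a b => a.1 < b.1) →
      (∀ p ∈ bridge, t < p.1 ∧ p.1 ≤ t + span) →
      load = (bridge.map (·.2)).sum →
      (bridge = [] → ans = t) →
      (bridge ≠ [] → ans ∈ bridge.map (·.1) ∧ ∀ p ∈ bridge, p.1 ≤ ans) →
      (∀ v ∈ waiting, v ≤ W) →
      (if bridge = [] then t + 1 else ans) + waiting.length * span ≤ t + fuel →
      pvLoopA L W fuel t (pvConc span t bridge) (waiting.map (fun v => (v, 1))) load =
        pvLoopB span W waiting bridge load t ans := by
  have hspan1 : 1 ≤ span := by by_cases hL : L > 1 <;> simp [hL] at hspan <;> omega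
  intro fuel
  induction fuel with
  | zero =>
    intro waiting bridge t load ans hs hb hl hemp hne hw hfuel
    exfalso
    have h0 : 0 ≤ (waiting.length : Int) * span :=
      mul_nonneg (Int.natCast_nonneg _) (by omega)
    by_cases hbr : bridge = []
    · simp [hbr] at hfuel; omega
    · obtain ⟨hmem, _⟩ := hne hbr
      obtain ⟨p, hp, hpe⟩ := List.mem_map.mp hmem
      have := (hb p hp).1
      simp [hbr] at hfuel
      omega
  | succ fuel ih =>
    intro waiting bridge t load ans hs hb hl hemp hne hw hfuel
    -- abbreviations for the post-advance state
    set b1 := bridge.filter (fun q => t + 1 < q.1) with hb1def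
    have hadv := pvAdvanceA_conc L span t hspan bridge hb
    have hsplit := pvSumSplit (t + 1) bridge
    have hl1 : load - ((bridge.filter (fun q => ¬ t + 1 < q.1)).map (·.2)).sum
        = (b1.map (·.2)).sum := by rw [hl, hb1def]; linarith
    have hs1 : b1.Pairwise (fun a b => a.1 < b.1) := hs.filter _
    have hb1 : ∀ p ∈ b1, t + 1 < p.1 ∧ p.1 ≤ t + 1 + span := by
      intro p hp
      have h2 := List.of_mem_filter hp
      have h3 := hb p (List.mem_of_mem_filter hp)
      simp at h2
      omega
    have hkeepans : bridge ≠ [] → b1 ≠ [] → ans ∈ b1.map (·.1) ∧ ∀ p ∈ b1, p.1 ≤ ans := by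
      intro hbr hbne
      obtain ⟨hmem, hub⟩ := hne hbr
      obtain ⟨p, hp, hpe⟩ := List.mem_map.mp hmem
      constructor
      · by_cases hansgt : t + 1 < ans
        · exact List.mem_map.mpr ⟨p, List.mem_filter.mpr ⟨hp, by simp; omega⟩, hpe⟩
        · exfalso
          exact hbne (List.filter_eq_nil_iff.mpr (fun q hq => by
            have := hub q hq; simp; omega))
      · intro q hq; exact hub q (List.mem_of_mem_filter hq)
    cases waiting with
    | nil =>
      simp only [List.map_nil]
      by_cases hbr : bridge = []
      · subst hbr
        simp [pvLoopA, pvLoopB, pvConc, hemp rfl]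
      · have hconcne : pvConc span t bridge ≠ [] := by
          simp [pvConc, hbr]
        rw [show pvLoopA L W (fuel + 1) t (pvConc span t bridge) [] load
            = pvLoopA L W fuel (t + 1) (pvAdvanceA L (pvConc span t bridge)).1 []
                (load - (pvAdvanceA L (pvConc span t bridge)).2) by
          simp [pvLoopA, hconcne]]
        rw [hadv]
        dsimp only
        by_cases hb1e : b1 = []
        · rw [show (List.filter (fun p => decide (t + 1 < p.1)) bridge) = b1 from rfl, hb1e]
          simp only [pvConc, List.map_nil]
          rw [pvLoopA_nil]
          obtain ⟨hmem, hub⟩ := hne hbr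
          obtain ⟨p, hp, hpe⟩ := List.mem_map.mp hmem
          have hple := (hb p hp).1
          have : ∀ q ∈ bridge, ¬ (t + 1 < q.1) := by
            intro q hq
            have := List.filter_eq_nil_iff.mp hb1e q hq
            simpa using this
          have := this p hp
          simp [pvLoopB]
          omega
        · have hIH := ih [] b1 (t + 1) ((b1.map (·.2)).sum) ans hs1 hb1
            rfl (fun h => absurd h hb1e) (fun _ => hkeepans hbr hb1e)
            (by simp) ?_
          · rw [hl1]
            simp only [List.map_nil, pvLoopB] at hIH ⊢
            exact hIH
          · simp [hb1e, hbr] at hfuel ⊢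
            omega
    | cons w ws =>
      have hwW : w ≤ W := hw w (by simp)
      have hdrop : pvDropB (t + 1) bridge load
          = (b1, (b1.map (·.2)).sum) := by
        rw [pvDropB_char (t + 1) bridge load hs, ← hl1]
      have hstep : pvLoopA L W (fuel + 1) t (pvConc span t bridge)
            (((w :: ws).map (fun v => (v, 1)))) load
          = (if (b1.map (·.2)).sum + w ≤ W then
              pvLoopA L W fuel (t + 1)
                (pvConc span (t + 1) b1 ++ [(w, 1)]) (ws.map (fun v => (v, 1)))
                ((b1.map (·.2)).sum + w)
            else
              pvLoopA L W fuel (t + 1) (pvConc span (t + 1) b1)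
                ((w :: ws).map (fun v => (v, 1))) ((b1.map (·.2)).sum)) := by
        simp only [List.map_cons, pvLoopA, hadv]
        rw [show (List.filter (fun p => decide (t + 1 < p.1)) bridge) = b1 from rfl]
        have hl1' : load - ((bridge.filter (fun p => decide (p.1 ≤ t + 1))).map (·.2)).sum
            = (b1.map (·.2)).sum := by simpa [not_lt] using hl1
        simp [hl1']
      by_cases hfeas : (b1.map (·.2)).sum + w ≤ W
      · -- the truck enters at time t+1
        have hconcapp : pvConc span (t + 1) b1 ++ [(w, 1)]
            = pvConc span (t + 1) (b1 ++ [(t + 1 + span, w)]) := by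
          simp [pvConc]
        have hjump : pvJumpB W w b1 ((b1.map (·.2)).sum) (t + 1)
            = (b1, (b1.map (·.2)).sum, t + 1) :=
          pvJumpB_noop W w b1 _ _ (by omega)
        have hbne' : b1 ++ [(t + 1 + span, w)] ≠ [] := by simp
        have hIH := ih ws (b1 ++ [(t + 1 + span, w)]) (t + 1)
            ((b1.map (·.2)).sum + w) (t + 1 + span)
            ?_ ?_ (by simp) (fun h => absurd h hbne') ?_ (fun v hv => hw v (by simp [hv])) ?_
        · rw [hstep, if_pos hfeas, hconcapp, hIH]
          conv_rhs => rw [pvLoopB]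
          simp only [hdrop, hjump]
        · rw [List.pairwise_append]
          refine ⟨hs1, by simp, ?_⟩
          intro a ha b hbm
          simp at hbm
          have h2 := (hb a (List.mem_of_mem_filter ha)).2
          rw [hbm]
          dsimp only
          omega
        · intro p hp
          rcases List.mem_append.mp hp with h | h
          · have := hb1 p h; omega
          · simp at h; subst h; exact ⟨by dsimp only; omega, by dsimp only; omega⟩
        · intro _
          constructor
          · simp
          · intro p hp
            rcases List.mem_append.mp hp with h | h
            · have := (hb1 p h).2; omega
            · simp at h; subst h; dsimp only; omega
        · -- fuel bound
          have hlen : (((w :: ws).length : Nat) : Int) = (ws.length : Int) + 1 := by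
            push_cast [List.length_cons]; ring
          rw [hlen, show ((ws.length : Int) + 1) * span = (ws.length : Int) * span + span
            from by ring] at hfuel
          have hX : t + 1 ≤ (if bridge = [] then t + 1 else ans) := by
            by_cases hbr : bridge = []
            · simp [hbr]
            · obtain ⟨hmem, _⟩ := hne hbr
              obtain ⟨p, hp, hpe⟩ := List.mem_map.mp hmem
              have := (hb p hp).1
              simp [hbr]
              omega
          rw [if_neg hbne']
          push_cast at hfuel ⊢
          omega
      · -- no entry this tick: one A-step, B's jump is stable
        have hb1ne : b1 ≠ [] := by
          intro h
          rw [h] at hfeas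
          simp at hfeas
          omega
        have hbrne : bridge ≠ [] := by
          intro h
          exact hb1ne (by simp [hb1def, h])
        have hstable := pvJumpB_stable W w t b1 ((b1.map (·.2)).sum)
            hwW rfl (by omega) hs1 (fun p hp => (hb1 p hp).1)
        have hIH := ih (w :: ws) b1 (t + 1) ((b1.map (·.2)).sum) ans
            hs1 hb1 rfl (fun h => absurd h hb1ne) (fun _ => hkeepans hbrne hb1ne)
            hw ?_
        · rw [hstep, if_neg hfeas, hIH]
          conv_lhs => rw [pvLoopB]
          conv_rhs => rw [pvLoopB]
          simp only [hdrop, show t + 1 + 1 = t + 2 from by ring, hstable]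
        · -- fuel bound (no-entry step)
          have hlen : (((w :: ws).length : Nat) : Int) = (ws.length : Int) + 1 := by
            push_cast [List.length_cons]; ring
          rw [hlen] at hfuel ⊢
          obtain ⟨hmem, _⟩ := hne hbrne
          obtain ⟨p, hp, hpe⟩ := List.mem_map.mp hmem
          have := (hb p hp).1
          rw [if_neg hbrne] at hfuel
          rw [if_neg hb1ne]
          push_cast at hfuel ⊢
          omega

-- ===== VERDICT (by name: the statement is the Claim_ definition above) =====
theorem solution_spec : Claim_equal_solution := by
  intro L W ts _ hpre
  unfold Spec_solution solution solution_alt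
  have hspan : (if L > 1 then L else 1) = if L > 1 then L else 1 := rfl
  have h := pvMain L W (if L > 1 then L else 1) rfl
    (ts.length * (if L > 1 then L else 1).toNat + 1) ts [] 0 0 0
    (by simp) (by simp) (by simp) (by simp) (by simp) hpre ?_
  · simpa [pvConc] using h
  · have hc : ((if L > 1 then L else 1).toNat : Int) = (if L > 1 then L else 1) := by
      split <;> omega
    simp only [if_pos rfl]
    push_cast
    rw [hc]
    linarith
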